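-- pv_equiv track=rewrite | github.com/ac-kavali/testss | Music/mazegen/algorithms/bfs.py | path_to_cells
-- ===== SOURCE A (Python) =====
-- def path_to_cells(start: tuple[int, int],
--                   solution: list[str]) -> list[tuple[int, int]]:
--     """
--     Convert a start position and list of direction letters to a list of cells.
--
--     Args:
--         start:      (row, col) starting cell.
--         solution: List of 'N', 'E', 'S', 'W' moves.
--
--     Returns:
--         Ordered list of (row, col) cells including start and end.
--     """
--     cords = {'N': (-1, 0), 'E': (0, 1), 'S': (1, 0), 'W': (0, -1)}
--     cells: list[tuple[int, int]] = [start]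
--     r, c = start
--     for d in solution:
--         dr, dc = cords[d]
--         r, c = r + dr, c + dc
--         cells.append((r, c))
--     return cells
-- ===== SOURCE B (Python) =====
-- def _prefix(init, xs):
--     total = init
--     res = [init]
--     for x in xs:
--         total += x
--         res.append(total)
--     return res
--
--
-- def path_to_cells(start, solution):
--     cords = {'N': (-1, 0), 'E': (0, 1), 'S': (1, 0), 'W': (0, -1)}
--     deltas = [cords[d] for d in solution]
--     rows = _prefix(start[0], [dr for dr, _ in deltas])
--     cols = _prefix(start[1], [dc for _, dc in deltas])
--     return list(zip(rows, cols))
-- ===== Notes on version B (the rewrite author's own statement) =====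
-- stated objective: alternative
-- what changed: Instead of A's single loop mutating (r, c) and appending, B first decodes the letters into a delta list, then computes the row and column coordinates independently as two prefix-sum lists and zips them into the cell list.
import Mathlib
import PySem

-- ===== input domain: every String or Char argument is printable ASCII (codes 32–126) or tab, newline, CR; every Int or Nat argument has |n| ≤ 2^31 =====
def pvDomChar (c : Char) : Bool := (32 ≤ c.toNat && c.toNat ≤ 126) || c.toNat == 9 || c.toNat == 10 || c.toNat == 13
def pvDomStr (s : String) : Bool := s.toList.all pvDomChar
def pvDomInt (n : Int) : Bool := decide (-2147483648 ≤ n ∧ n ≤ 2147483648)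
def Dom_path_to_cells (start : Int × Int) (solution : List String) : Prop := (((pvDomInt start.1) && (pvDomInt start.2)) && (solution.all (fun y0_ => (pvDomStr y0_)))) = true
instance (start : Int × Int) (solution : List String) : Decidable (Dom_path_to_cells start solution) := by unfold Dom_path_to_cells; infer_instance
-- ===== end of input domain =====

-- B decodes the letters to deltas, then builds the row and column coordinates as
-- two independent prefix-sum lists and zips them (objective: alternative decomposition).

-- ===== PORT A =====
-- the dict literal 'cords' (shared by both ports; both Pythons use the same literal)
def pvCords : PySem.Dict String (Int × Int) :=
  PySem.Dict.ofList [("N", (-1, 0)), ("E", (0, 1)), ("S", (1, 0)), ("W", (0, -1))]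

-- A's for-loop over solution; 'none' from the lookup = KeyError (excluded by Pre_)
def pvALoop (cells : List (Int × Int)) (r c : Int) (solution : List String) : List (Int × Int) :=
  match solution with
  | [] => cells
  | d :: rest =>
    match pvCords.get? d with
    | none => cells
    | some (dr, dc) => pvALoop (cells ++ [(r + dr, c + dc)]) (r + dr) (c + dc) rest

def path_to_cells (start : Int × Int) (solution : List String) : List (Int × Int) :=
  pvALoop [start] start.1 start.2 solution

-- ===== PORT B =====
-- B's comprehension '[cords[d] for d in solution]'; 'none' = KeyError (excluded by Pre_)
def pvDeltas (solution : List String) : Option (List (Int × Int)) :=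
  match solution with
  | [] => some []
  | d :: rest =>
    match pvCords.get? d, pvDeltas rest with
    | some p, some ps => some (p :: ps)
    | _, _ => none

-- B's helper '_prefix': running-total loop appending to 'res'
def pvPrefix (init : Int) (xs : List Int) : List Int :=
  (xs.foldl (fun (st : List Int × Int) x => (st.1 ++ [st.2 + x], st.2 + x)) ([init], init)).1

def path_to_cells_alt (start : Int × Int) (solution : List String) : List (Int × Int) :=
  match pvDeltas solution with
  | none => []  -- KeyError in Python (outside Pre_)
  | some deltas =>
    List.zip (pvPrefix start.1 (deltas.map Prod.fst)) (pvPrefix start.2 (deltas.map Prod.snd))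

-- ===== PRECONDITION & SPEC =====
-- Both A and B raise KeyError on any move letter other than 'N','E','S','W'; Pre_ admits exactly the valid move lists.
def Pre_path_to_cells (start : Int × Int) (solution : List String) : Prop :=
  solution.all (fun d => d = "N" ∨ d = "E" ∨ d = "S" ∨ d = "W")
instance (start : Int × Int) (solution : List String) : Decidable (Pre_path_to_cells start solution) := by unfold Pre_path_to_cells; infer_instance
def pvWitness_path_to_cells : (Int × Int) × List String := ((0, 0), ["N", "E", "S", "W", "N"])

def Spec_path_to_cells (start : Int × Int) (solution : List String) (out : List (Int × Int)) : Prop := out = path_to_cells_alt start solution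
instance (start : Int × Int) (solution : List String) (out : List (Int × Int)) : Decidable (Spec_path_to_cells start solution out) := by unfold Spec_path_to_cells; infer_instance

-- ===== CLAIM (what is proved, stated in full; the proofs are below) =====
def Claim_equal_path_to_cells : Prop := ∀ (start : Int × Int) (solution : List String), Dom_path_to_cells start solution → Pre_path_to_cells start solution → Spec_path_to_cells start solution (path_to_cells start solution)

-- ===== LEMMAS AND PROOFS =====
-- the tail of a prefix-sum list, as a simple recursion used as common reference shape
def pvScanTail (t : Int) (xs : List Int) : List Int :=
  match xs with
  | [] => []
  | x :: rest => (t + x) :: pvScanTail (t + x) rest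

theorem pvPrefix_foldl (xs : List Int) :
    ∀ (acc : List Int) (t : Int),
      (xs.foldl (fun (st : List Int × Int) x => (st.1 ++ [st.2 + x], st.2 + x)) (acc, t)).1
        = acc ++ pvScanTail t xs := by
  induction xs with
  | nil => intro acc t; simp [pvScanTail]
  | cons x rest ih =>
    intro acc t
    simp only [List.foldl_cons, pvScanTail]
    rw [ih]
    simp

theorem pvPrefix_eq (init : Int) (xs : List Int) :
    pvPrefix init xs = init :: pvScanTail init xs := by
  simpa using pvPrefix_foldl xs [init] init

-- reference shape: the path as a cons-built recursion over the delta list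
def pvSpine (p : Int × Int) (ds : List (Int × Int)) : List (Int × Int) :=
  match ds with
  | [] => [p]
  | (dr, dc) :: rest => p :: pvSpine (p.1 + dr, p.2 + dc) rest

theorem pvZip_eq_spine (ds : List (Int × Int)) :
    ∀ (r c : Int),
      List.zip (r :: pvScanTail r (ds.map Prod.fst)) (c :: pvScanTail c (ds.map Prod.snd))
        = pvSpine (r, c) ds := by
  induction ds with
  | nil => intro r c; simp [pvScanTail, pvSpine]
  | cons d rest ih =>
    intro r c
    obtain ⟨dr, dc⟩ := d
    simp only [List.map_cons, pvScanTail, pvSpine, List.zip_cons_cons]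
    exact congrArg _ (ih (r + dr) (c + dc))

theorem pvALoop_eq_spine (solution : List String) :
    ∀ (ds : List (Int × Int)), pvDeltas solution = some ds →
      ∀ (cells : List (Int × Int)) (r c : Int),
        pvALoop (cells ++ [(r, c)]) r c solution = cells ++ pvSpine (r, c) ds := by
  induction solution with
  | nil =>
    intro ds h cells r c
    simp [pvDeltas] at h
    subst h
    simp [pvALoop, pvSpine]
  | cons d rest ih =>
    intro ds h cells r c
    simp only [pvDeltas] at h
    cases hd : pvCords.get? d with
    | none => simp [hd] at h
    | some p =>
      rw [hd] at h
      cases hr : pvDeltas rest with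
      | none => simp [hr] at h
      | some ps =>
        rw [hr] at h
        simp only [Option.some.injEq] at h
        subst h
        obtain ⟨dr, dc⟩ := p
        simp only [pvALoop, hd, pvSpine]
        rw [ih ps hr (cells ++ [(r, c)]) (r + dr) (c + dc)]
        simp

theorem pvDeltas_some_of_pre (solution : List String)
    (h : solution.all (fun d => d = "N" ∨ d = "E" ∨ d = "S" ∨ d = "W")) :
    ∃ ds, pvDeltas solution = some ds := by
  induction solution with
  | nil => exact ⟨[], rfl⟩
  | cons d rest ih =>
    simp only [List.all_cons, Bool.and_eq_true, decide_eq_true_eq] at h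
    obtain ⟨hd, hrest⟩ := h
    obtain ⟨ds, hds⟩ := ih (by simpa using hrest)
    have hget : ∃ p, pvCords.get? d = some p := by
      rcases hd with h | h | h | h <;> subst h
      · exact ⟨((-1 : Int), (0 : Int)), by decide⟩
      · exact ⟨((0 : Int), (1 : Int)), by decide⟩
      · exact ⟨((1 : Int), (0 : Int)), by decide⟩
      · exact ⟨((0 : Int), (-1 : Int)), by decide⟩
    obtain ⟨p, hp⟩ := hget
    exact ⟨p :: ds, by simp [pvDeltas, hp, hds]⟩

-- ===== VERDICT (by name: the statement is the Claim_ definition above) =====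
theorem path_to_cells_spec : Claim_equal_path_to_cells := by
  intro start solution _ hpre
  unfold Spec_path_to_cells path_to_cells path_to_cells_alt
  obtain ⟨ds, hds⟩ := pvDeltas_some_of_pre solution (by simpa [Pre_path_to_cells] using hpre)
  rw [hds]
  dsimp only
  rw [pvPrefix_eq, pvPrefix_eq, pvZip_eq_spine]
  simpa using pvALoop_eq_spine solution ds hds [] start.1 start.2
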